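-- pv_equiv track=rewrite | github.com/julianbopp/cbct-artifact-reduction | src/cbct_artifact_reduction/utils.py | getAllplanmecaIDs
-- ===== SOURCE A (Python) =====
-- def get_scanner_from_num(num: int):
--     orig_num = num
--     scanner = ""
--     material = ""
--     implants = ""
--     fov = ""
--
--     if ((num - 1) // 20) % 4 == 0:
--         scanner = "axeos"
--     elif ((num - 1) // 20) % 4 == 1:
--         scanner = "accuitomo"
--     elif ((num - 1) // 20) % 4 == 2:
--         scanner = "planmeca"
--     elif ((num - 1) // 20) % 4 == 3:
--         scanner = "x800"
--
--     if num % 10 == 0: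
--         material = ""
--         implants = 0
--     elif (num % 10) % 3 == 1:
--         implants = 3
--     elif (num % 10) % 3 == 2:
--         implants = 2
--     elif (num % 10) % 3 == 0:
--         implants = 1
--
--     if ((num - 1) % 10) // 3 == 0:
--         material = "ti"
--     elif ((num - 1) % 10) // 3 == 1:
--         material = "tizr"
--     elif ((num - 1) % 10) // 3 == 2:
--         material = "zr"
--
--     if ((num - 1) // 10) % 2 == 0:
--         fov = "small"
--     elif ((num - 1) // 10) % 2 == 1:
--         fov = "large"
--
--     return orig_num, scanner, material, implants, fov
--
-- def getAllplanmecaIDs(exludeIDs: list[int] | None = [41, 208]) -> list[str]: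
--     """Find all scan ID's that correspond to Planmeca images in the CBCT pig jaw data.
--
--     The CBCT pig jaw dataset consists of 398 scans. The scans with the ID's 41 and 208 are missing.
--
--     Args:
--         exludeIDs (list[int], optional): List of scan ID's to exclude. Defaults to missing ID's of CBCT pig jaw data.
--     Returns:
--         list[str]: List of scan ID's that correspond to Planmeca images.
--     """
--
--     if exludeIDs is None:
--         possibleIDs = [f"{f}" for f in range(1, 401)]
--     else:
--         possibleIDs = [f"{f}" for f in range(1, 401) if f not in exludeIDs]
--
--     planmecaIDs: list[str] = []
--     for id in possibleIDs:
--         scanner = get_scanner_from_num(int(id))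
--         if scanner[1] == "planmeca":
--             planmecaIDs.append(id)
--
--     return planmecaIDs
-- ===== SOURCE B (Python) =====
-- def getAllplanmecaIDs(exludeIDs=[41, 208]):
--     planmecaIDs: list[str] = []
--     for start in range(41, 401, 80):
--         for f in range(start, start + 20):
--             if exludeIDs is None or f not in exludeIDs:
--                 planmecaIDs.append(str(f))
--     return planmecaIDs
-- ===== Notes on version B (the rewrite author's own statement) =====
-- stated objective: faster
-- what changed: B emits the five contiguous planmeca ID blocks 41-60, 121-140, 201-220, 281-300, 361-380 directly (4x fewer iterations, no str->int round-trip or scanner decoding per ID) instead of scanning all 1..400 and testing each via get_scanner_from_num.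
import Mathlib
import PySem

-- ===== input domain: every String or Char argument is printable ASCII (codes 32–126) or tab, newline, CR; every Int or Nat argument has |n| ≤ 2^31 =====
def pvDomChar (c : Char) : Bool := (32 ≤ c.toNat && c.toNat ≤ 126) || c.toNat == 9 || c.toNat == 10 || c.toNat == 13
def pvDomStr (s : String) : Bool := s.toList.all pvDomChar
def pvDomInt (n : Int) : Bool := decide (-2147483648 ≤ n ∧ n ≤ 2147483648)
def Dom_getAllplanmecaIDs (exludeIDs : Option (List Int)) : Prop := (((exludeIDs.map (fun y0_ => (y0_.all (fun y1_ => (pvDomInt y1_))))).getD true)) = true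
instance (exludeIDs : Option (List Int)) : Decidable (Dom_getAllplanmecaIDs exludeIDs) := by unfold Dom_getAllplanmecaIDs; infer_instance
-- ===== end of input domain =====

-- B emits the five contiguous planmeca ID blocks directly instead of scanning 1..400 and
-- decoding each ID's scanner from its string form; objective: simpler.

-- ===== PORT A =====
-- Literal port of get_scanner_from_num. Python initialises implants to "" but every branch
-- chain below is exhaustive on its residues, so implants is always reassigned an int; the
-- unreachable else-arms return the initial-value defaults (0 / "").
def get_scanner_from_num (num : Int) : Int × String × String × Int × String :=
  let orig_num := num
  let scanner : String :=
    if PySem.Int.mod (PySem.Int.floordiv (num - 1) 20) 4 = 0 then "axeos"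
    else if PySem.Int.mod (PySem.Int.floordiv (num - 1) 20) 4 = 1 then "accuitomo"
    else if PySem.Int.mod (PySem.Int.floordiv (num - 1) 20) 4 = 2 then "planmeca"
    else if PySem.Int.mod (PySem.Int.floordiv (num - 1) 20) 4 = 3 then "x800"
    else ""
  let implants : Int :=
    if PySem.Int.mod num 10 = 0 then 0
    else if PySem.Int.mod (PySem.Int.mod num 10) 3 = 1 then 3
    else if PySem.Int.mod (PySem.Int.mod num 10) 3 = 2 then 2
    else if PySem.Int.mod (PySem.Int.mod num 10) 3 = 0 then 1
    else 0
  let material : String :=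
    if PySem.Int.floordiv (PySem.Int.mod (num - 1) 10) 3 = 0 then "ti"
    else if PySem.Int.floordiv (PySem.Int.mod (num - 1) 10) 3 = 1 then "tizr"
    else if PySem.Int.floordiv (PySem.Int.mod (num - 1) 10) 3 = 2 then "zr"
    else ""
  let fov : String :=
    if PySem.Int.mod (PySem.Int.floordiv (num - 1) 10) 2 = 0 then "small"
    else if PySem.Int.mod (PySem.Int.floordiv (num - 1) 10) 2 = 1 then "large"
    else ""
  (orig_num, scanner, material, implants, fov)

def getAllplanmecaIDs (exludeIDs : Option (List Int)) : List String :=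
  let possibleIDs : List String :=
    match exludeIDs with
    | none => (PySem.List.pyRange 1 401 1).map (fun f => PySem.Int.toStr f)
    | some l => ((PySem.List.pyRange 1 401 1).filter (fun f => !l.contains f)).map
        (fun f => PySem.Int.toStr f)
  -- int(id) always succeeds on these decimal strings; .getD 0 is the (unreachable) ValueError arm
  possibleIDs.foldl (fun planmecaIDs id =>
    let scanner := get_scanner_from_num ((PySem.Int.ofStr? id).getD 0)
    if scanner.2.1 = "planmeca" then planmecaIDs ++ [id] else planmecaIDs) []

-- ===== PORT B =====
def getAllplanmecaIDs_alt (exludeIDs : Option (List Int)) : List String :=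
  (PySem.List.pyRange 41 401 80).foldl (fun planmecaIDs start =>
    (PySem.List.pyRange start (start + 20) 1).foldl (fun planmecaIDs f =>
      if (match exludeIDs with | none => true | some l => !l.contains f)
      then planmecaIDs ++ [PySem.Int.toStr f] else planmecaIDs) planmecaIDs) []

-- ===== PRECONDITION & SPEC =====
def Spec_getAllplanmecaIDs (exludeIDs : Option (List Int)) (out : List String) : Prop := out = getAllplanmecaIDs_alt exludeIDs
instance (exludeIDs : Option (List Int)) (out : List String) : Decidable (Spec_getAllplanmecaIDs exludeIDs out) := by unfold Spec_getAllplanmecaIDs; infer_instance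

-- ===== CLAIM (what is proved, stated in full; the proofs are below) =====
def Claim_equal_getAllplanmecaIDs : Prop := ∀ (exludeIDs : Option (List Int)), Dom_getAllplanmecaIDs exludeIDs → Spec_getAllplanmecaIDs exludeIDs (getAllplanmecaIDs exludeIDs)

-- ===== LEMMAS AND PROOFS =====

-- the planmeca test A applies to each id, pulled back to the underlying integer
def pvPlan (f : Int) : Bool :=
  decide ((get_scanner_from_num ((PySem.Int.ofStr? (PySem.Int.toStr f)).getD 0)).2.1 = "planmeca")

-- filtering 1..400 by A's planmeca test gives exactly B's five blocks (closed computation)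
lemma pvBlocks_eq :
    (PySem.List.pyRange 1 401 1).filter pvPlan =
      PySem.List.pyRange 41 61 1 ++ PySem.List.pyRange 121 141 1 ++
      PySem.List.pyRange 201 221 1 ++ PySem.List.pyRange 281 301 1 ++
      PySem.List.pyRange 361 381 1 := by decide

-- the common core: both programs, for an arbitrary keep-predicate p on the integer id
lemma pvCore (p : Int → Bool) :
    (((PySem.List.pyRange 1 401 1).filter p).map (fun f => PySem.Int.toStr f)).foldl
      (fun acc id =>
        if (get_scanner_from_num ((PySem.Int.ofStr? id).getD 0)).2.1 = "planmeca"
        then acc ++ [id] else acc) [] =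
    (PySem.List.pyRange 41 401 80).foldl (fun acc start =>
      (PySem.List.pyRange start (start + 20) 1).foldl (fun acc f =>
        if p f then acc ++ [PySem.Int.toStr f] else acc) acc) [] := by
  have hq : ∀ (acc : List String) (id : String),
      (if (get_scanner_from_num ((PySem.Int.ofStr? id).getD 0)).2.1 = "planmeca"
       then acc ++ [id] else acc) =
      (if (fun s => decide ((get_scanner_from_num ((PySem.Int.ofStr? s).getD 0)).2.1 = "planmeca")) id = true
       then acc ++ [(fun x => x) id] else acc) := by intro acc id; simp
  rw [funext fun acc => funext fun id => hq acc id,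
    PySem.List.foldl_append_if _ (fun x => x)]
  have hR : PySem.List.pyRange 41 401 80 = [41, 121, 201, 281, 361] := by decide
  rw [hR]
  simp only [List.foldl_cons, List.foldl_nil,
    PySem.List.foldl_append_if p (fun f => PySem.Int.toStr f)]
  simp only [show (fun x : String => x) = id from rfl, List.map_id]
  rw [List.filter_map, List.filter_filter]
  have hcomm : (PySem.List.pyRange 1 401 1).filter
      (fun f => ((fun s => decide ((get_scanner_from_num ((PySem.Int.ofStr? s).getD 0)).2.1 = "planmeca")) ∘ (fun f => PySem.Int.toStr f)) f && p f)
      = ((PySem.List.pyRange 1 401 1).filter pvPlan).filter p := by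
    rw [List.filter_filter]
    exact List.filter_congr (fun x _ => by simp [pvPlan, Function.comp, Bool.and_comm])
  rw [hcomm, pvBlocks_eq]
  simp [List.filter_append]


-- ===== VERDICT (by name: the statement is the Claim_ definition above) =====
theorem getAllplanmecaIDs_spec : Claim_equal_getAllplanmecaIDs := by
  intro ex _
  unfold Spec_getAllplanmecaIDs getAllplanmecaIDs getAllplanmecaIDs_alt
  cases ex with
  | none =>
      have h := pvCore (fun _ => true)
      simpa using h
  | some l =>
      have h := pvCore (fun f => !l.contains f)
      simpa using h
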